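-- pv_equiv track=rewrite | github.com/graceyqlin/more_coding_practice | Coding_Fundamental/get_level_and_nodes_from_tree.py | get_levels_for_nodes_in_dag
-- ===== SOURCE A (Python) =====
-- def get_levels_for_nodes_in_dag(graph, root_node):
--
--     import collections
--
--     if root_node is None:
--         return []
--
--     node_to_level_map = collections.defaultdict(list)
--
--     nodes_at_current_level = [root_node]
--
--     level = 0
--
--     while nodes_at_current_level:
--         nodes_at_next_level = []
--         for current_node in nodes_at_current_level:
--             node_to_level_map[level].append(current_node)
--
--             nodes_at_next_level += [i for i in graph[current_node]]
--
--         nodes_at_current_level = nodes_at_next_level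
--
--         level += 1
--
--
--     return node_to_level_map
-- ===== SOURCE B (Python) =====
-- def get_levels_for_nodes_in_dag(graph, root_node):
--     import collections
--     if root_node is None:
--         return []
--     node_to_level_map = collections.defaultdict(list)
--     queue = collections.deque([(root_node, 0)])
--     while queue:
--         node, level = queue.popleft()
--         node_to_level_map[level].append(node)
--         for child in graph[node]:
--             queue.append((child, level + 1))
--     return node_to_level_map
-- ===== Notes on version B (the rewrite author's own statement) =====
-- stated objective: idiomatic
-- what changed: B replaces A's two nested loops over explicit per-level frontier lists (with a separate level counter and a '+='-rebuilt next-level list) by the textbook single-FIFO-queue BFS: one while-loop over a deque of (node, level) pairs, appending each dequeued node to result[level] and enqueueing its children at level+1.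
import Mathlib
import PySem

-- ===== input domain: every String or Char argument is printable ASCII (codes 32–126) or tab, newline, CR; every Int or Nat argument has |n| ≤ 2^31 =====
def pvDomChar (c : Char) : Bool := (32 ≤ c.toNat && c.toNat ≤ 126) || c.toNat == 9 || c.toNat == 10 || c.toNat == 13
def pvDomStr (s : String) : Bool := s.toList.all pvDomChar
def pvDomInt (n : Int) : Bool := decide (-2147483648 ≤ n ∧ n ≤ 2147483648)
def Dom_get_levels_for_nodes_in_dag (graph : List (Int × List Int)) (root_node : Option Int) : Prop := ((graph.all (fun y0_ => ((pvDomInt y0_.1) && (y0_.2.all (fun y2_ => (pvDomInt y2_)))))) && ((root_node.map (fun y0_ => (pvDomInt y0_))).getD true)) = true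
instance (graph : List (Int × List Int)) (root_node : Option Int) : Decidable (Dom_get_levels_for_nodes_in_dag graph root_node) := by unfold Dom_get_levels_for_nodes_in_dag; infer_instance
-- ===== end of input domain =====

-- B replaces A's two nested level-by-level loops (frontier list rebuilt per level, explicit level counter)
-- by the textbook single-FIFO-queue BFS over (node, level) pairs; same cost, idiomatic. A diverges on a cycle
-- reachable from the root and raises KeyError on a reachable missing key; Pre_ excludes exactly those inputs,
-- the ports use fuel there.

-- ===== PORT A =====
-- shared helper: graph[x] as a first-match association-list lookup ([] stands for the KeyError case, excluded by Pre_)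
def pvLookup (graph : List (Int × List Int)) (x : Int) : List Int :=
  match graph with
  | [] => []
  | (k, v) :: rest => if k == x then v else pvLookup rest x

-- the while-loop of A; fuel graph.length+1 suffices on every input admitted by Pre_ (levels are bounded by the key count)
def pvLoopA (graph : List (Int × List Int)) : Nat → PySem.Dict Int (List Int) → List Int → Int → PySem.Dict Int (List Int)
  | 0, d, _, _ => d
  | fuel+1, d, frontier, level =>
    if frontier = [] then d
    else
      let st := frontier.foldl
        (fun (st : PySem.Dict Int (List Int) × List Int) current_node =>
          (st.1.modify level [] (fun l => l ++ [current_node]),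
           st.2 ++ (pvLookup graph current_node).map (fun i => i)))
        (d, [])
      pvLoopA graph fuel st.1 st.2 (level + 1)

def get_levels_for_nodes_in_dag (graph : List (Int × List Int)) (root_node : Option Int) : List (Int × List Int) :=
  match root_node with
  | none => []
  | some root => (pvLoopA graph (graph.length + 1) PySem.Dict.empty [root] 0).items

-- ===== PORT B =====
-- the successive BFS frontiers (proof-side description of the levels; B uses it only to size its fuel)
def pvFrontiers (graph : List (Int × List Int)) : Nat → List Int → List (List Int)
  | 0, _ => []
  | fuel+1, frontier =>
    if frontier = [] then []
    else frontier :: pvFrontiers graph fuel (frontier.flatMap (fun node => pvLookup graph node))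

-- totality guard for B's while-loop: on every input admitted by Pre_ this is exactly the number of
-- dequeues the Python loop performs (the total number of nodes over all levels)
def pvFuelB (graph : List (Int × List Int)) (root : Int) : Nat :=
  ((pvFrontiers graph (graph.length + 1) [root]).map List.length).sum

-- B's while-loop: pop (node, level) from the FIFO queue, append node to result[level], enqueue children at level+1
def pvLoopB (graph : List (Int × List Int)) : Nat → PySem.Dict Int (List Int) → List (Int × Int) → PySem.Dict Int (List Int)
  | 0, d, _ => d
  | _+1, d, [] => d
  | fuel+1, d, (node, level) :: queue =>
      pvLoopB graph fuel (d.modify level [] (fun l => l ++ [node]))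
        (queue ++ (pvLookup graph node).map (fun child => (child, level + 1)))

def get_levels_for_nodes_in_dag_alt (graph : List (Int × List Int)) (root_node : Option Int) : List (Int × List Int) :=
  match root_node with
  | none => []
  | some root => (pvLoopB graph (pvFuelB graph root) PySem.Dict.empty [(root, 0)]).items

-- ===== PRECONDITION & SPEC =====
-- Pre_ admits exactly the inputs where Python A returns: every node reachable from the root is a key of the graph
-- (otherwise A raises KeyError) and no reachable node lies on a cycle (otherwise A's while-loop never terminates) —
-- stated as: the deduplicated breadth-first reachability layers die out within graph.length+1 steps, every layer node a key.
-- the adjacency of x read off the association list (first matching key), as a reader would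
def pvAdj (graph : List (Int × List Int)) (x : Int) : List Int :=
  ((graph.find? (fun p => p.1 == x)).map Prod.snd).getD []

def pvLayersOk (graph : List (Int × List Int)) : Nat → List Int → Bool
  | 0, F => F.isEmpty
  | n+1, F => F.isEmpty ||
      (F.all (fun x => (graph.map Prod.fst).contains x)
        && pvLayersOk graph n ((F.flatMap (fun x => pvAdj graph x)).dedup))

def pvPreCheck (graph : List (Int × List Int)) (root_node : Option Int) : Bool :=
  match root_node with
  | none => true
  | some root => pvLayersOk graph (graph.length + 1) [root]

def Pre_get_levels_for_nodes_in_dag (graph : List (Int × List Int)) (root_node : Option Int) : Prop :=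
  pvPreCheck graph root_node = true
instance (graph : List (Int × List Int)) (root_node : Option Int) : Decidable (Pre_get_levels_for_nodes_in_dag graph root_node) := by unfold Pre_get_levels_for_nodes_in_dag; infer_instance

def pvWitness_get_levels_for_nodes_in_dag : (List (Int × List Int)) × Option Int :=
  ([(1, [2, 3]), (2, [3]), (3, [])], some 1)

def Spec_get_levels_for_nodes_in_dag (graph : List (Int × List Int)) (root_node : Option Int) (out : List (Int × List Int)) : Prop := out = get_levels_for_nodes_in_dag_alt graph root_node
instance (graph : List (Int × List Int)) (root_node : Option Int) (out : List (Int × List Int)) : Decidable (Spec_get_levels_for_nodes_in_dag graph root_node out) := by unfold Spec_get_levels_for_nodes_in_dag; infer_instance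

-- ===== CLAIM (what is proved, stated in full; the proofs are below) =====
def Claim_equal_get_levels_for_nodes_in_dag : Prop := ∀ (graph : List (Int × List Int)) (root_node : Option Int), Dom_get_levels_for_nodes_in_dag graph root_node → Pre_get_levels_for_nodes_in_dag graph root_node → Spec_get_levels_for_nodes_in_dag graph root_node (get_levels_for_nodes_in_dag graph root_node)

-- ===== LEMMAS AND PROOFS =====

-- a fold whose two pair components do not interact splits into two folds
theorem pvFoldlPairSplit {α β γ : Type} (l : List α) (f : β → α → β) (g : γ → α → γ) (d : β) (acc : γ) :
    l.foldl (fun st n => (f st.1 n, g st.2 n)) (d, acc) = (l.foldl f d, l.foldl g acc) := by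
  induction l generalizing d acc with
  | nil => rfl
  | cons x xs ih => simp only [List.foldl_cons]; exact ih _ _

theorem pvOfListConst (ns : List Int) (k : Int) (h : ns ≠ []) :
    PySem.Set.ofList (ns.map (fun _ => k)) = [k] := by
  induction ns with
  | nil => exact absurd rfl h
  | cons x xs ih =>
    rcases xs with _ | ⟨y, ys⟩
    · rfl
    · simp only [List.map_cons] at ih ⊢
      rw [PySem.Set.ofList_cons, PySem.Set.ofList_cons] at *
      rw [ih (by simp)]
      simp [PySem.Set.discard]

-- appending every element of ns to the fresh key k appends the single item (k, ns)
theorem pvItemsModifyFold (ns : List Int) (k : Int) (d : PySem.Dict Int (List Int))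
    (hne : ns ≠ []) (hnd : d.keys.Nodup) (hk : k ∉ d.keys) :
    (ns.foldl (fun d n => d.modify k [] (fun l => l ++ [n])) d).items = d.items ++ [(k, ns)] := by
  have hcont : d.contains k = false := by
    rw [PySem.Dict.contains_eq_decide_mem_keys]; simpa using hk
  have hkeys : (ns.foldl (fun d n => d.modify k [] (fun l => l ++ [n])) d).keys
      = d.keys ++ [k] := by
    rw [PySem.Dict.keys_foldl_modify_key ns (fun _ => k) [] (fun _ n => (fun l => l ++ [n])) d]
    rw [PySem.Set.update_eq_append_filter, pvOfListConst ns k hne]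
    simp [PySem.Set.contains_eq_listContains, hk]
  have hndres : (ns.foldl (fun d n => d.modify k [] (fun l => l ++ [n])) d).keys.Nodup := by
    rw [hkeys]; simp [List.nodup_append, hnd]
    intro a ha h
    subst h
    exact hk ha
  have hfold : ns.foldl (fun d n => d.modify k [] (fun l => l ++ [n])) d
      = (ns.map (fun n => ((k : Int), n))).foldl (fun d p => d.modify p.1 [] (fun l => l ++ [p.2])) d := by
    rw [List.foldl_map]
  have hgetD : ∀ c : Int, (ns.foldl (fun d n => d.modify k [] (fun l => l ++ [n])) d).getD c []
      = if c = k then ns else d.getD c [] := by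
    intro c
    rw [hfold, PySem.Dict.getD_foldl_modify_append]
    by_cases hc : c = k
    · subst hc
      have : (List.map (fun n => ((c : Int), n)) ns).filter (fun p => p.1 == c) = ns.map (fun n => (c, n)) := by
        simp [List.filter_eq_self]
      rw [this]
      have hd0 : d.getD c [] = [] := PySem.Dict.getD_of_not_contains d [] hcont
      simp [hd0, List.map_map]
    · have : (List.map (fun n => ((k : Int), n)) ns).filter (fun p => p.1 == c) = [] := by
        simp [List.filter_eq_nil_iff]
        intro n _ hkc
        exact hc hkc.symm
      simp [this, hc]
  rw [PySem.Dict.items_eq_map_keys _ hndres [], hkeys, List.map_append]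
  have h1 : d.keys.map (fun c => (c, (ns.foldl (fun d n => d.modify k [] (fun l => l ++ [n])) d).getD c []))
      = d.keys.map (fun c => (c, d.getD c [])) := by
    apply List.map_congr_left
    intro c hc
    rw [hgetD c, if_neg (by rintro rfl; exact hk hc)]
  rw [h1, ← PySem.Dict.items_eq_map_keys d hnd []]
  simp [hgetD]

-- the dict built by A's loop is the enumeration (from `level`) of the frontier list
theorem pvLoopEq (graph : List (Int × List Int)) :
    ∀ (fuel : Nat) (frontier : List Int) (d : PySem.Dict Int (List Int)) (level : Int),
    d.keys.Nodup → (∀ c ∈ d.keys, c < level) →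
    (pvLoopA graph fuel d frontier level).items
      = d.items ++ PySem.List.enumerate (pvFrontiers graph fuel frontier) level := by
  intro fuel
  induction fuel with
  | zero => intro frontier d level _ _; simp [pvLoopA, pvFrontiers, PySem.List.enumerate_nil]
  | succ fuel ih =>
    intro frontier d level hnd hlt
    by_cases hf : frontier = []
    · simp [pvLoopA, pvFrontiers, hf, PySem.List.enumerate_nil]
    · rw [pvLoopA, pvFrontiers, if_neg hf, if_neg hf]
      show (pvLoopA graph fuel
          (frontier.foldl (fun (st : PySem.Dict Int (List Int) × List Int) current_node =>
            (st.1.modify level [] (fun l => l ++ [current_node]),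
             st.2 ++ (pvLookup graph current_node).map (fun i => i))) (d, [])).1
          (frontier.foldl (fun (st : PySem.Dict Int (List Int) × List Int) current_node =>
            (st.1.modify level [] (fun l => l ++ [current_node]),
             st.2 ++ (pvLookup graph current_node).map (fun i => i))) (d, [])).2
          (level + 1)).items = _
      rw [pvFoldlPairSplit frontier
        (fun d current_node => d.modify level [] (fun l => l ++ [current_node]))
        (fun acc current_node => acc ++ (pvLookup graph current_node).map (fun i => i)) d []]
      have hnext : frontier.foldl (fun acc current_node => acc ++ (pvLookup graph current_node).map (fun i => i)) []
          = frontier.flatMap (fun node => pvLookup graph node) := by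
        rw [PySem.List.foldl_append_eq_flatMap]
        simp
      have hitems : (frontier.foldl (fun d n => d.modify level [] (fun l => l ++ [n])) d).items
          = d.items ++ [(level, frontier)] :=
        pvItemsModifyFold frontier level d hf hnd (by intro hm; exact lt_irrefl level (hlt level hm))
      have hkeys2 : (frontier.foldl (fun d n => d.modify level [] (fun l => l ++ [n])) d).keys
          = d.keys ++ [level] := by
        show ((frontier.foldl (fun d n => d.modify level [] (fun l => l ++ [n])) d).items).map Prod.fst = _
        rw [hitems]; simp
        rfl
      rw [hnext, ih _ _ (level + 1)
        (by rw [hkeys2]; simp [List.nodup_append, hnd]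
            intro a ha h; subst h; exact lt_irrefl a (hlt a ha))
        (by rw [hkeys2]; intro c hc
            rcases List.mem_append.mp hc with h | h
            · exact lt_trans (hlt c h) (by omega)
            · simp at h; omega)]
      rw [hitems, PySem.List.enumerate_cons]
      simp

-- B-side: consuming the remaining level-`lvl` prefix of the queue performs the per-node dict appends
-- and leaves exactly the level-(lvl+1) queue
theorem pvLoopBConsume (graph : List (Int × List Int)) :
    ∀ (rest next : List Int) (d : PySem.Dict Int (List Int)) (lvl : Int) (F : Nat),
    pvLoopB graph (rest.length + F) d
        (rest.map (fun n => (n, lvl)) ++ next.map (fun n => (n, lvl + 1)))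
      = pvLoopB graph F (rest.foldl (fun d n => d.modify lvl [] (fun l => l ++ [n])) d)
          ((next ++ rest.flatMap (fun node => pvLookup graph node)).map (fun n => (n, lvl + 1))) := by
  intro rest
  induction rest with
  | nil => intro next d lvl F; simp
  | cons r rest ih =>
    intro next d lvl F
    have hlen : (r :: rest).length + F = (rest.length + F) + 1 := by simp; omega
    rw [hlen]
    show pvLoopB graph ((rest.length + F) + 1) d ((r, lvl) :: (rest.map (fun n => (n, lvl)) ++ next.map (fun n => (n, lvl + 1)))) = _
    rw [pvLoopB]
    have hq : (rest.map (fun n => (n, lvl)) ++ next.map (fun n => (n, lvl + 1)))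
          ++ (pvLookup graph r).map (fun child => (child, lvl + 1))
        = rest.map (fun n => (n, lvl)) ++ (next ++ pvLookup graph r).map (fun n => (n, lvl + 1)) := by
      simp [List.map_append]
    rw [hq, ih (next ++ pvLookup graph r) _ lvl F]
    simp

-- the keys of a dict whose items enumerate ls from 0 are 0,…,ls.length-1
theorem pvEnumKeysLt (ls : List (List Int)) (d : PySem.Dict Int (List Int))
    (h : d.items = PySem.List.enumerate ls 0) :
    d.keys.Nodup ∧ ∀ c ∈ d.keys, 0 ≤ c ∧ c < (ls.length : Int) := by
  have hk : d.keys = (PySem.List.enumerate ls 0).map Prod.fst := by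
    show d.items.map Prod.fst = _; rw [h]
  rw [hk, PySem.List.map_fst_enumerate]
  constructor
  · have := PySem.List.pairwise_lt_enumerate (xs := ls) (s := (0 : Int))
    have hp : ((PySem.List.enumerate ls 0).map Prod.fst).Pairwise (· < ·) :=
      List.Pairwise.map _ (fun a b hab => hab) this
    rw [PySem.List.map_fst_enumerate] at hp
    exact List.Pairwise.imp (fun h => ne_of_lt h) hp
  · intro c hc
    rw [PySem.List.mem_pyRange_one] at hc
    omega

-- after consuming one whole frontier, the dict enumerates one more level
theorem pvDictLevelStep (frontier : List Int) (ls : List (List Int)) (d : PySem.Dict Int (List Int))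
    (hne : frontier ≠ []) (h : d.items = PySem.List.enumerate ls 0) :
    (frontier.foldl (fun d n => d.modify (ls.length : Int) [] (fun l => l ++ [n])) d).items
      = PySem.List.enumerate (ls ++ [frontier]) 0 := by
  obtain ⟨hnd, hlt⟩ := pvEnumKeysLt ls d h
  rw [pvItemsModifyFold frontier (ls.length : Int) d hne hnd
    (fun hm => absurd (hlt _ hm).2 (lt_irrefl _)), h,
    PySem.List.enumerate_append]
  simp

-- B's queue loop, fed one frontier at fuel = total size of the remaining levels, enumerates those levels
theorem pvLoopBEq (graph : List (Int × List Int)) :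
    ∀ (fuel : Nat) (frontier : List Int) (d : PySem.Dict Int (List Int)) (ls : List (List Int)),
    d.items = PySem.List.enumerate ls 0 →
    (pvLoopB graph (((pvFrontiers graph fuel frontier).map List.length).sum) d
        (frontier.map (fun n => (n, (ls.length : Int))))).items
      = PySem.List.enumerate (ls ++ pvFrontiers graph fuel frontier) 0 := by
  intro fuel
  induction fuel with
  | zero => intro frontier d ls h; simpa [pvLoopB, pvFrontiers] using h
  | succ fuel ih =>
    intro frontier d ls h
    by_cases hf : frontier = []
    · simpa [pvLoopB, pvFrontiers, hf] using h
    · rw [pvFrontiers, if_neg hf]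
      have hsum : ((frontier :: pvFrontiers graph fuel (frontier.flatMap (fun node => pvLookup graph node))).map List.length).sum
          = frontier.length + ((pvFrontiers graph fuel (frontier.flatMap (fun node => pvLookup graph node))).map List.length).sum := by
        simp
      rw [hsum]
      have hq : frontier.map (fun n => (n, (ls.length : Int)))
          = frontier.map (fun n => (n, (ls.length : Int))) ++ ([] : List Int).map (fun n => (n, (ls.length : Int) + 1)) := by
        simp
      rw [hq, pvLoopBConsume graph frontier [] d (ls.length : Int) _]
      have hd' := pvDictLevelStep frontier ls d hf h
      have hlen : ((ls ++ [frontier]).length : Int) = (ls.length : Int) + 1 := by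
        simp
      have := ih (frontier.flatMap (fun node => pvLookup graph node)) _ (ls ++ [frontier]) hd'
      rw [hlen] at this
      simpa using this

-- ===== VERDICT (by name: the statement is the Claim_ definition above) =====
theorem get_levels_for_nodes_in_dag_spec : Claim_equal_get_levels_for_nodes_in_dag := by
  intro graph root_node _ _
  unfold Spec_get_levels_for_nodes_in_dag
  cases root_node with
  | none => rfl
  | some root =>
    simp only [get_levels_for_nodes_in_dag, get_levels_for_nodes_in_dag_alt]
    rw [pvLoopEq graph (graph.length + 1) [root] PySem.Dict.empty 0
      (by rw [PySem.Dict.keys_empty]; exact List.nodup_nil)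
      (by rw [PySem.Dict.keys_empty]; intro c hc; cases hc)]
    have hB := pvLoopBEq graph (graph.length + 1) [root] PySem.Dict.empty []
      (by simp [PySem.List.enumerate_nil]; rfl)
    simp only [List.length_nil, Int.natCast_zero, List.map_cons, List.map_nil, List.nil_append] at hB
    rw [pvFuelB] at *
    rw [hB]
    simp
    rfl
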